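-- pv_equiv track=rewrite | github.com/m-hikichi/Agent-skills | skills/spec-driven-dev/scripts/verify_spec_consistency.py | extract_any_top_level_table
-- ===== SOURCE A (Python) =====
-- from typing import Dict, List, Sequence, Tuple
--
-- def extract_any_top_level_table(markdown: str) -> List[Dict[str, str]]:
--     lines = markdown.splitlines()
--     for index, line in enumerate(lines):
--         if not line.strip().startswith("|"):
--             continue
--         table_lines: List[str] = []
--         for follow in lines[index:]:
--             stripped = follow.strip()
--             if stripped.startswith("|"):
--                 table_lines.append(stripped)
--                 continue
--             if table_lines:
--                 break
--         if len(table_lines) < 2: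
--             continue
--         headers = [cell.strip() for cell in table_lines[0].strip("|").split("|")]
--         rows: List[Dict[str, str]] = []
--         for row_line in table_lines[2:]:
--             cells = [cell.strip() for cell in row_line.strip("|").split("|")]
--             if len(cells) == len(headers):
--                 rows.append(dict(zip(headers, cells)))
--         return rows
--     return []
-- ===== SOURCE B (Python) =====
-- def extract_any_top_level_table(markdown):
--     # Single pass: partition the lines into maximal runs of '|'-lines,
--     # then render the first run of length >= 2.
--     runs = []
--     current = []
--     for line in markdown.splitlines():
--         s = line.strip()
--         if s.startswith("|"):
--             current.append(s)
--         elif current: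
--             runs.append(current)
--             current = []
--     if current:
--         runs.append(current)
--     block = next((r for r in runs if len(r) >= 2), None)
--     if block is None:
--         return []
--     headers = [c.strip() for c in block[0].strip("|").split("|")]
--     return [dict(zip(headers, cells))
--             for cells in ([c.strip() for c in r.strip("|").split("|")] for r in block[2:])
--             if len(cells) == len(headers)]
-- ===== Notes on version B (the rewrite author's own statement) =====
-- stated objective: simpler
-- what changed: Replaces A's index loop with a per-index rescan of the suffix by a single-pass partition of the lines into maximal runs of '|'-lines, then renders the first run with at least 2 lines via a comprehension.
import Mathlib
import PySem

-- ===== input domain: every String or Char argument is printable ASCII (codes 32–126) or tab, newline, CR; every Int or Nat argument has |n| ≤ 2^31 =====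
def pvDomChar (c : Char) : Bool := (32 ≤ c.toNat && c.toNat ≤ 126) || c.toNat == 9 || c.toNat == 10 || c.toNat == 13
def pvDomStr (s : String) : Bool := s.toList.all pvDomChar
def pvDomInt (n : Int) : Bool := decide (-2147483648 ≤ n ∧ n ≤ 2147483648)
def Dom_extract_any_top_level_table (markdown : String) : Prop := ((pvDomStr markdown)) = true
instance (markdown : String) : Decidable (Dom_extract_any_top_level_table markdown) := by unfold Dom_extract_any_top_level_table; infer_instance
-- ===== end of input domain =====

-- B replaces A's outer index loop with per-index rescans by a single-pass partition of the
-- lines into maximal runs of '|'-lines; objective: simpler. Return value only; no mutation.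

-- shared one-liner: [cell.strip() for cell in s.strip("|").split("|")] (identical in both Pythons)
def pvCells (s : String) : List String :=
  -- s.strip("|").split("|") with nonempty separator "|" (split? is some there), each cell stripped
  ((PySem.Str.split? (PySem.Str.stripChars s "|") "|").getD []).map PySem.Str.strip

-- ===== PORT A =====
-- A's inner loop: collect the stripped run of '|'-lines from the current suffix, break after it
def pvTableLines : List String → List String → List String
  | [], table_lines => table_lines
  | follow :: rest, table_lines =>
    let stripped := PySem.Str.strip follow
    if PySem.Str.startswith stripped "|" then pvTableLines rest (table_lines ++ [stripped])
    else if table_lines.isEmpty then pvTableLines rest table_lines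
    else table_lines

-- A's outer loop over enumerate(lines): the suffix lines[index:] is the current list
def pvScanA : List String → List (List (String × String))
  | [] => []
  | line :: rest =>
    if !(PySem.Str.startswith (PySem.Str.strip line) "|") then pvScanA rest
    else
      let table_lines := pvTableLines (line :: rest) []
      if table_lines.length < 2 then pvScanA rest
      else
        let headers := pvCells (table_lines.headD "")
        (table_lines.drop 2).foldl (fun rows row_line =>
          if (pvCells row_line).length = headers.length
          then rows ++ [(PySem.Dict.ofList (headers.zip (pvCells row_line))).items]
          else rows) []

def extract_any_top_level_table (markdown : String) : List (List (String × String)) :=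
  pvScanA (PySem.Str.splitlines markdown)

-- ===== PORT B =====
-- Source B's single pass: partition lines into maximal runs of stripped '|'-lines
def pvRunsB : List String → List String → List (List String) → List (List String)
  | [], current, runs => if current.isEmpty then runs else runs ++ [current]
  | l :: ls, current, runs =>
    let s := PySem.Str.strip l
    if PySem.Str.startswith s "|" then pvRunsB ls (current ++ [s]) runs
    else if current.isEmpty then pvRunsB ls current runs
    else pvRunsB ls [] (runs ++ [current])

def extract_any_top_level_table_alt (markdown : String) : List (List (String × String)) :=
  let runs := pvRunsB (PySem.Str.splitlines markdown) [] []
  match (runs.filter (fun r => 2 ≤ r.length)).head? with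
  | none => []
  | some block =>
    let headers := pvCells (block.headD "")
    (block.drop 2).filterMap (fun r =>
      if (pvCells r).length = headers.length
      then some ((PySem.Dict.ofList (headers.zip (pvCells r))).items)
      else none)

-- ===== PRECONDITION & SPEC =====
def Spec_extract_any_top_level_table (markdown : String) (out : List (List (String × String))) : Prop := out = extract_any_top_level_table_alt markdown
instance (markdown : String) (out : List (List (String × String))) : Decidable (Spec_extract_any_top_level_table markdown out) := by unfold Spec_extract_any_top_level_table; infer_instance

-- ===== CLAIM (what is proved, stated in full; the proofs are below) =====
def Claim_equal_extract_any_top_level_table : Prop := ∀ (markdown : String), Dom_extract_any_top_level_table markdown → Spec_extract_any_top_level_table markdown (extract_any_top_level_table markdown)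

-- ===== LEMMAS AND PROOFS =====

def pvPred (l : String) : Bool := PySem.Chars.startswith (PySem.Chars.strip l.toList) ['|']

def pvRenderA (tl : List String) : List (List (String × String)) :=
  (tl.drop 2).foldl (fun rows row_line =>
    if (pvCells row_line).length = (pvCells (tl.headD "")).length
    then rows ++ [(PySem.Dict.ofList ((pvCells (tl.headD "")).zip (pvCells row_line))).items]
    else rows) []

def pvRender (block : List String) : List (List (String × String)) :=
  (block.drop 2).filterMap (fun r =>
    if (pvCells r).length = (pvCells (block.headD "")).length
    then some ((PySem.Dict.ofList ((pvCells (block.headD "")).zip (pvCells r))).items)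
    else none)

def pvProcess (runs : List (List String)) : List (List (String × String)) :=
  match (runs.filter (fun r => 2 ≤ r.length)).head? with
  | none => []
  | some block => pvRender block

theorem pv_foldl_filterMap {α β : Type} (p : α → Prop) [DecidablePred p] (f : α → β)
    (xs : List α) (acc : List β) :
    xs.foldl (fun a x => if p x then a ++ [f x] else a) acc
      = acc ++ xs.filterMap (fun x => if p x then some (f x) else none) := by
  induction xs generalizing acc with
  | nil => simp
  | cons x xs ih =>
    by_cases h : p x <;> simp [h, ih, List.append_assoc]

theorem pvRenderA_eq (tl : List String) : pvRenderA tl = pvRender tl := by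
  unfold pvRenderA pvRender
  rw [pv_foldl_filterMap (fun x => (pvCells x).length = (pvCells (tl.headD "")).length)
    (fun x => (PySem.Dict.ofList ((pvCells (tl.headD "")).zip (pvCells x))).items)]
  simp

theorem pvTableLines_eq (ls : List String) (acc : List String) (h : acc ≠ []) :
    pvTableLines ls acc = acc ++ (ls.takeWhile pvPred).map PySem.Str.strip := by
  induction ls generalizing acc with
  | nil => simp [pvTableLines]
  | cons l ls ih =>
    cases hp : pvPred l with
    | true =>
      have hp' : PySem.Chars.startswith (PySem.Chars.strip l.toList) ['|'] = true := hp
      have := ih (acc ++ [PySem.Str.strip l]) (by simp)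
      simp [pvTableLines, hp', this, hp, List.append_assoc]
    | false =>
      have hp' : PySem.Chars.startswith (PySem.Chars.strip l.toList) ['|'] = false := hp
      simp [pvTableLines, hp', List.isEmpty_iff, h, hp]

theorem pvRunsB_cons_pos (l : String) (ls : List String) (cur : List String)
    (runs : List (List String)) (hp : pvPred l = true) :
    pvRunsB (l :: ls) cur runs = pvRunsB ls (cur ++ [PySem.Str.strip l]) runs := by
  have hp' : PySem.Chars.startswith (PySem.Chars.strip l.toList) ['|'] = true := hp
  simp [pvRunsB, hp']

theorem pvRunsB_shift (ls : List String) (cur : List String) (runs : List (List String)) :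
    pvRunsB ls cur runs = runs ++ pvRunsB ls cur [] := by
  induction ls generalizing cur runs with
  | nil => by_cases h : cur.isEmpty <;> simp [pvRunsB, h]
  | cons l ls ih =>
    cases hp : pvPred l with
    | true =>
      rw [pvRunsB_cons_pos l ls cur runs hp, pvRunsB_cons_pos l ls cur [] hp]
      exact ih _ _
    | false =>
      have hp' : PySem.Chars.startswith (PySem.Chars.strip l.toList) ['|'] = false := hp
      by_cases hc : cur.isEmpty
      · have e : ∀ rs, pvRunsB (l :: ls) cur rs = pvRunsB ls cur rs := by
          intro rs; simp [pvRunsB, hp', hc]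
        rw [e, e, ih]
      · have e : ∀ rs, pvRunsB (l :: ls) cur rs = pvRunsB ls [] (rs ++ [cur]) := by
          intro rs; simp [pvRunsB, hp', hc]
        rw [e, e, ih [] (runs ++ [cur]), ih [] ([] ++ [cur])]
        simp

theorem pvRunsB_run (ls : List String) (cur : List String) (h : cur ≠ []) :
    pvRunsB ls cur []
      = (cur ++ (ls.takeWhile pvPred).map PySem.Str.strip) :: pvRunsB (ls.dropWhile pvPred) [] [] := by
  induction ls generalizing cur with
  | nil => simp [pvRunsB, List.isEmpty_iff, h]
  | cons l ls ih =>
    cases hp : pvPred l with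
    | true =>
      rw [pvRunsB_cons_pos l ls cur [] hp, ih (cur ++ [PySem.Str.strip l]) (by simp)]
      simp [hp, List.append_assoc]
    | false =>
      have hp' : PySem.Chars.startswith (PySem.Chars.strip l.toList) ['|'] = false := hp
      have e : pvRunsB (l :: ls) cur [] = pvRunsB ls [] ([] ++ [cur]) := by
        simp [pvRunsB, hp', List.isEmpty_iff, h]
      have e2 : pvRunsB (l :: ls) [] [] = pvRunsB ls [] [] := by
        simp [pvRunsB, hp']
      rw [e, pvRunsB_shift, List.takeWhile_cons, List.dropWhile_cons]
      simp [hp, e2]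

theorem pv_dropWhile_of_takeWhile_nil {α : Type} (p : α → Bool) (ls : List α)
    (h : ls.takeWhile p = []) : ls.dropWhile p = ls := by
  cases ls with
  | nil => rfl
  | cons x xs =>
    cases hp : p x
    · simp [hp]
    · simp [List.takeWhile_cons, hp] at h

theorem pvScanA_eq (lines : List String) :
    pvScanA lines = pvProcess (pvRunsB lines [] []) := by
  induction lines with
  | nil => simp [pvScanA, pvRunsB, pvProcess]
  | cons l ls ih =>
    cases hp : pvPred l with
    | false =>
      have hp' : PySem.Chars.startswith (PySem.Chars.strip l.toList) ['|'] = false := hp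
      have e1 : pvScanA (l :: ls) = pvScanA ls := by simp [pvScanA, hp']
      have e2 : pvRunsB (l :: ls) [] [] = pvRunsB ls [] [] := by simp [pvRunsB, hp']
      rw [e1, e2, ih]
    | true =>
      have hp' : PySem.Chars.startswith (PySem.Chars.strip l.toList) ['|'] = true := hp
      have htl : pvTableLines (l :: ls) []
          = PySem.Str.strip l :: (ls.takeWhile pvPred).map PySem.Str.strip := by
        have step : pvTableLines (l :: ls) [] = pvTableLines ls [PySem.Str.strip l] := by
          simp [pvTableLines, hp']
        rw [step, pvTableLines_eq ls [PySem.Str.strip l] (by simp)]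
        rfl
      have hruns : pvRunsB (l :: ls) [] []
          = (PySem.Str.strip l :: (ls.takeWhile pvPred).map PySem.Str.strip)
            :: pvRunsB (ls.dropWhile pvPred) [] [] := by
        rw [pvRunsB_cons_pos l ls [] [] hp]
        simp only [List.nil_append]
        rw [pvRunsB_run ls [PySem.Str.strip l] (by simp)]
        rfl
      have eA : pvScanA (l :: ls)
          = if (pvTableLines (l :: ls) []).length < 2 then pvScanA ls
            else pvRenderA (pvTableLines (l :: ls) []) := by
        simp [pvScanA, hp', pvRenderA]
      by_cases hT : ls.takeWhile pvPred = []
      · have hdrop : ls.dropWhile pvPred = ls := pv_dropWhile_of_takeWhile_nil _ _ hT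
        have hlen : (pvTableLines (l :: ls) []).length < 2 := by simp [htl, hT]
        rw [eA, if_pos hlen, ih, hruns, hT, hdrop]
        simp [pvProcess]
      · have h1 : 1 ≤ (ls.takeWhile pvPred).length := by
          cases hc : ls.takeWhile pvPred with
          | nil => exact absurd hc hT
          | cons a as => simp
        have hlen : ¬ (pvTableLines (l :: ls) []).length < 2 := by
          rw [htl]; simp only [List.length_cons, List.length_map]; omega
        rw [eA, if_neg hlen, hruns, htl, pvRenderA_eq]
        simp [pvProcess, h1]

-- ===== VERDICT (by name: the statement is the Claim_ definition above) =====
theorem extract_any_top_level_table_spec : Claim_equal_extract_any_top_level_table := by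
  intro markdown _
  unfold Spec_extract_any_top_level_table extract_any_top_level_table extract_any_top_level_table_alt
  rw [pvScanA_eq]
  have : ∀ runs, pvProcess runs
      = match (runs.filter (fun r => 2 ≤ r.length)).head? with
        | none => []
        | some block =>
          (block.drop 2).filterMap (fun r =>
            if (pvCells r).length = (pvCells (block.headD "")).length
            then some ((PySem.Dict.ofList ((pvCells (block.headD "")).zip (pvCells r))).items)
            else none) := by
    intro runs; unfold pvProcess pvRender; rfl
  rw [this]
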